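-- pv_equiv track=rewrite | github.com/bassalat/idea-kill-switch | utils/firecrawl_client.py | _prioritize_urls
-- ===== SOURCE A (Python) =====
-- from typing import Dict, List, Optional, Any, Union
--
-- def _prioritize_urls(urls: List[str]) -> List[str]:
--     """Prioritize URLs for scraping based on value."""
--     scored_urls = []
--
--     for url in urls:
--         score = 0
--         url_lower = url.lower()
--
--         # High priority sources
--         if 'reddit.com' in url_lower:
--             score += 10
--         elif any(domain in url_lower for domain in ['stackoverflow.com', 'quora.com']):
--             score += 8
--         elif any(domain in url_lower for domain in ['medium.com', 'substack.com']):
--             score += 6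
--
--         # Content type indicators
--         if any(indicator in url_lower for indicator in ['/comments/', '/post/', '/thread/']):
--             score += 5
--         elif any(indicator in url_lower for indicator in ['/review/', '/feedback/']):
--             score += 4
--
--         # Recency indicators (rough heuristic)
--         if any(year in url_lower for year in ['2024', '2023']):
--             score += 2
--
--         scored_urls.append((score, url))
--
--     # Sort by score (descending) and return URLs
--     scored_urls.sort(key=lambda x: x[0], reverse=True)
--     return [url for score, url in scored_urls]
-- ===== SOURCE B (Python) =====
-- from typing import List
--
-- def _score(url: str) -> int:
--     u = url.lower()
--     if 'reddit.com' in u: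
--         s1 = 10
--     elif 'stackoverflow.com' in u or 'quora.com' in u:
--         s1 = 8
--     elif 'medium.com' in u or 'substack.com' in u:
--         s1 = 6
--     else:
--         s1 = 0
--     if '/comments/' in u or '/post/' in u or '/thread/' in u:
--         s2 = 5
--     elif '/review/' in u or '/feedback/' in u:
--         s2 = 4
--     else:
--         s2 = 0
--     s3 = 2 if ('2024' in u or '2023' in u) else 0
--     return s1 + s2 + s3
--
-- def _prioritize_urls(urls: List[str]) -> List[str]:
--     """Bucket distribution instead of a comparison sort: scores lie in 0..17,
--     so emit each score's URLs (in input order) from 17 down to 0."""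
--     scored = [(_score(u), u) for u in urls]
--     out = []
--     for s in range(17, -1, -1):
--         out.extend(u for sc, u in scored if sc == s)
--     return out
-- ===== Notes on version B (the rewrite author's own statement) =====
-- stated objective: faster
-- what changed: Replaces building (score,url) tuples and a stable comparison sort (reverse=True) with a bucket distribution pass: scores are bounded in 0..17, so B scores each URL once and emits each score's URLs in input order from 17 down to 0.
import Mathlib
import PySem

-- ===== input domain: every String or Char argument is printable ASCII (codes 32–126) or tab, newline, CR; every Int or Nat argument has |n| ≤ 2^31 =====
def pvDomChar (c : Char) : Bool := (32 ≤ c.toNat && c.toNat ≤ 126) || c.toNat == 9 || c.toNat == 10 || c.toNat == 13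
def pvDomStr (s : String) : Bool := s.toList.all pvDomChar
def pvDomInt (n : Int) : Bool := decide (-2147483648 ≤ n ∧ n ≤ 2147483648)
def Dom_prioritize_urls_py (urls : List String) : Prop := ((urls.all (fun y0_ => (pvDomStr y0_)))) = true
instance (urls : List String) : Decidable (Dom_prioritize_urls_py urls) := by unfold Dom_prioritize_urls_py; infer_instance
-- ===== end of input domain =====

-- B replaces A's stable comparison sort by a bucket-distribution pass over the bounded score range 0..17 (alternative decomposition, same results).


-- ===== PORT A =====
-- A's loop body (the per-url scoring and append), kept step for step as Python writes it
def pvLoopBodyA (acc : List (Int × String)) (url : String) : List (Int × String) :=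
  let score : Int := 0
  let url_lower := PySem.Str.lower url
  let score : Int :=
    if PySem.Str.isIn "reddit.com" url_lower then score + 10
    else if ["stackoverflow.com", "quora.com"].any (fun d => PySem.Str.isIn d url_lower) then score + 8
    else if ["medium.com", "substack.com"].any (fun d => PySem.Str.isIn d url_lower) then score + 6
    else score
  let score : Int :=
    if ["/comments/", "/post/", "/thread/"].any (fun i => PySem.Str.isIn i url_lower) then score + 5
    else if ["/review/", "/feedback/"].any (fun i => PySem.Str.isIn i url_lower) then score + 4
    else score
  let score : Int :=
    if ["2024", "2023"].any (fun y => PySem.Str.isIn y url_lower) then score + 2 else score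
  acc ++ [(score, url)]

def prioritize_urls_py (urls : List String) : List String :=
  let scored_urls : List (Int × String) := urls.foldl pvLoopBodyA []
  let sorted_urls := PySem.List.sorted scored_urls (fun x => x.1) true
  sorted_urls.map (fun p => p.2)

-- ===== PORT B =====
def pvScoreB (url : String) : Int :=
  let u := PySem.Str.lower url
  let s1 : Int :=
    if PySem.Str.isIn "reddit.com" u then 10
    else if PySem.Str.isIn "stackoverflow.com" u || PySem.Str.isIn "quora.com" u then 8
    else if PySem.Str.isIn "medium.com" u || PySem.Str.isIn "substack.com" u then 6
    else 0
  let s2 : Int :=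
    if PySem.Str.isIn "/comments/" u || PySem.Str.isIn "/post/" u || PySem.Str.isIn "/thread/" u then 5
    else if PySem.Str.isIn "/review/" u || PySem.Str.isIn "/feedback/" u then 4
    else 0
  let s3 : Int := if PySem.Str.isIn "2024" u || PySem.Str.isIn "2023" u then 2 else 0
  s1 + s2 + s3

def prioritize_urls_py_alt (urls : List String) : List String :=
  let scored : List (Int × String) := urls.map (fun u => (pvScoreB u, u))
  (PySem.List.pyRange 17 (-1) (-1)).foldl
    (fun out s => out ++ (scored.filter (fun p => p.1 == s)).map (fun p => p.2)) []

-- ===== PRECONDITION & SPEC =====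
def Spec_prioritize_urls_py (urls : List String) (out : List String) : Prop := out = prioritize_urls_py_alt urls
instance (urls : List String) (out : List String) : Decidable (Spec_prioritize_urls_py urls out) := by unfold Spec_prioritize_urls_py; infer_instance

-- ===== CLAIM (what is proved, stated in full; the proofs are below) =====
def Claim_equal_prioritize_urls_py : Prop := ∀ (urls : List String), Dom_prioritize_urls_py urls → Spec_prioritize_urls_py urls (prioritize_urls_py urls)

-- ===== LEMMAS AND PROOFS =====

-- descending-bucket concatenation of a scored list
def pvBucket (S : List Int) (xs : List (Int × String)) : List (Int × String) :=
  S.flatMap (fun s => xs.filter (fun p => p.1 == s))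

theorem pvBucket_nil (S : List Int) : pvBucket S [] = [] := by
  simp [pvBucket]

theorem pvBucket_not_mem (S : List Int) (xs : List (Int × String)) (x : Int × String)
    (h : x.1 ∉ S) : pvBucket S (xs ++ [x]) = pvBucket S xs := by
  unfold pvBucket
  apply List.flatMap_congr
  intro s hs
  have hne : (x.1 == s) = false := beq_eq_false_iff_ne.mpr (fun he => h (he ▸ hs))
  simp [List.filter_append, hne]

theorem pvMem_bucket_key (S : List Int) (xs : List (Int × String)) (y : Int × String)
    (h : y ∈ pvBucket S xs) : y.1 ∈ S := by
  unfold pvBucket at h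
  rcases List.mem_flatMap.mp h with ⟨s, hs, hy⟩
  rcases List.mem_filter.mp hy with ⟨_, he⟩
  exact (beq_iff_eq.mp he) ▸ hs

theorem pvInsertBy_prefix (x : Int × String) (as bs : List (Int × String))
    (h : ∀ y ∈ as, ¬ (y.1 < x.1)) :
    PySem.List.insertBy (fun a b => decide (b.1 < a.1)) x (as ++ bs)
      = as ++ PySem.List.insertBy (fun a b => decide (b.1 < a.1)) x bs := by
  induction as with
  | nil => simp
  | cons a t ih =>
      have ha : ¬ (a.1 < x.1) := h a (by simp)
      simp only [List.cons_append, PySem.List.insertBy, decide_eq_true_eq]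
      rw [if_neg ha, ih (fun y hy => h y (by simp [hy]))]

theorem pvInsertBy_all (x : Int × String) (bs : List (Int × String))
    (h : ∀ y ∈ bs, y.1 < x.1) :
    PySem.List.insertBy (fun a b => decide (b.1 < a.1)) x bs = x :: bs := by
  cases bs with
  | nil => rfl
  | cons b t =>
      have hb : b.1 < x.1 := h b (by simp)
      simp [PySem.List.insertBy, hb]

theorem pvInsert_bucket (S : List Int) (hS : S.Pairwise (· > ·))
    (x : Int × String) (hx : x.1 ∈ S) (xs : List (Int × String)) :
    PySem.List.insertBy (fun a b => decide (b.1 < a.1)) x (pvBucket S xs)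
      = pvBucket S (xs ++ [x]) := by
  induction S with
  | nil => cases hx
  | cons s S' ih =>
      rcases List.pairwise_cons.mp hS with ⟨hgt, hS'⟩
      have hbk : pvBucket (s :: S') xs
          = xs.filter (fun p => p.1 == s) ++ pvBucket S' xs := by
        simp [pvBucket]
      by_cases hxe : x.1 = s
      · -- x belongs to the first bucket: it passes the s-bucket and goes before all later buckets
        have hpre : ∀ y ∈ xs.filter (fun p => p.1 == s), ¬ (y.1 < x.1) := by
          intro y hy
          have : y.1 = s := beq_iff_eq.mp (List.mem_filter.mp hy).2
          omega
        have hall : ∀ y ∈ pvBucket S' xs, y.1 < x.1 := by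
          intro y hy
          have := hgt _ (pvMem_bucket_key S' xs y hy)
          omega
        rw [hbk, pvInsertBy_prefix x _ _ hpre, pvInsertBy_all x _ hall]
        have hnot : x.1 ∉ S' := by
          intro hmem; have := hgt _ hmem; omega
        have h1 : (xs ++ [x]).filter (fun p => p.1 == s) = xs.filter (fun p => p.1 == s) ++ [x] := by
          rw [List.filter_append]; simp [hxe]
        have hbk2 : pvBucket (s :: S') (xs ++ [x])
            = (xs ++ [x]).filter (fun p => p.1 == s) ++ pvBucket S' (xs ++ [x]) := by
          simp [pvBucket]
        rw [hbk2, h1, pvBucket_not_mem S' xs x hnot]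
        simp
      · -- x belongs to a later bucket: it passes the whole s-bucket
        have hx' : x.1 ∈ S' := by
          rcases hx with _ | h
          · exact absurd rfl hxe
          · assumption
        have hpre : ∀ y ∈ xs.filter (fun p => p.1 == s), ¬ (y.1 < x.1) := by
          intro y hy
          have hy1 : y.1 = s := beq_iff_eq.mp (List.mem_filter.mp hy).2
          have := hgt _ hx'
          omega
        have h1 : (xs ++ [x]).filter (fun p => p.1 == s) = xs.filter (fun p => p.1 == s) := by
          rw [List.filter_append]; simp [hxe]
        have hbk2 : pvBucket (s :: S') (xs ++ [x])
            = (xs ++ [x]).filter (fun p => p.1 == s) ++ pvBucket S' (xs ++ [x]) := by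
          simp [pvBucket]
        rw [hbk, pvInsertBy_prefix x _ _ hpre, ih hS' hx', hbk2, h1]

theorem pvSorted_eq_bucket (S : List Int) (hS : S.Pairwise (· > ·))
    (xs : List (Int × String)) (hk : ∀ x ∈ xs, x.1 ∈ S) :
    PySem.List.sorted xs (fun p => p.1) true = pvBucket S xs := by
  rw [PySem.List.sorted_rev_eq_foldl_insertBy]
  induction xs using List.reverseRecOn with
  | nil => simp [pvBucket_nil]
  | append_singleton ys x ih =>
      rw [List.foldl_append]
      simp only [List.foldl_cons, List.foldl_nil]
      rw [ih (fun y hy => hk y (by simp [hy])),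
          pvInsert_bucket S hS x (hk x (by simp)) ys]

theorem pvScoreB_bounds (u : String) : 0 ≤ pvScoreB u ∧ pvScoreB u ≤ 17 := by
  simp only [pvScoreB]
  split_ifs <;> omega

-- A's loop body appends exactly (pvScoreB url, url)
theorem pvLoopBodyA_eq (acc : List (Int × String)) (url : String) :
    pvLoopBodyA acc url = acc ++ [(pvScoreB url, url)] := by
  simp only [pvLoopBodyA, pvScoreB, List.any_cons, List.any_nil, Bool.or_false]
  split_ifs <;> simp_all

-- ===== VERDICT (by name: the statement is the Claim_ definition above) =====
theorem prioritize_urls_py_spec : Claim_equal_prioritize_urls_py := by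
  intro urls _
  unfold Spec_prioritize_urls_py
  show prioritize_urls_py urls = prioritize_urls_py_alt urls
  simp only [prioritize_urls_py, prioritize_urls_py_alt]
  have h1 : urls.foldl pvLoopBodyA [] = urls.map (fun u => (pvScoreB u, u)) := by
    rw [PySem.List.foldl_congr_mem urls pvLoopBodyA
          (fun acc url => acc ++ [(pvScoreB url, url)]) []
          (fun acc x _ => pvLoopBodyA_eq acc x),
        PySem.List.foldl_append_singleton_eq_map]
    simp
  rw [h1,
      pvSorted_eq_bucket (PySem.List.pyRange 17 (-1) (-1)) (by decide)
        (urls.map (fun u => (pvScoreB u, u)))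
        (by
          intro x hx
          rcases List.mem_map.mp hx with ⟨u, _, rfl⟩
          have := pvScoreB_bounds u
          rw [PySem.List.mem_pyRange_neg_one]
          constructor <;> omega),
      PySem.List.foldl_append_eq_flatMap]
  simp [pvBucket, List.map_flatMap]
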